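-- pv_equiv track=rewrite | github.com/Yipten/AdventOfCode2021 | day12/passage_pathing_2.py | find_num_duplicates
-- ===== SOURCE A (Python) =====
-- def find_num_duplicates(visited_caves):
--     '''
--     Finds the number of duplicate lowercase elements.
--     '''
--
--     duplicates = []
--     for cave in visited_caves:
--         if (cave.islower()
--                 and visited_caves.count(cave) == 2
--                 and not cave in duplicates):
--             duplicates.append(cave)
--     return len(duplicates)
-- ===== SOURCE B (Python) =====
-- def find_num_duplicates(visited_caves):
--     '''
--     Finds the number of duplicate lowercase elements.
--     '''
--     counts = {}
--     for cave in visited_caves: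
--         counts[cave] = counts.get(cave, 0) + 1
--     total = 0
--     for cave, n in counts.items():
--         if n == 2 and cave.islower():
--             total += 1
--     return total
-- ===== Notes on version B (the rewrite author's own statement) =====
-- stated objective: faster
-- what changed: Replaces the quadratic per-element list.count scan plus manual dedup list with a single-pass dict counter followed by one pass over its items.
import Mathlib
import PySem

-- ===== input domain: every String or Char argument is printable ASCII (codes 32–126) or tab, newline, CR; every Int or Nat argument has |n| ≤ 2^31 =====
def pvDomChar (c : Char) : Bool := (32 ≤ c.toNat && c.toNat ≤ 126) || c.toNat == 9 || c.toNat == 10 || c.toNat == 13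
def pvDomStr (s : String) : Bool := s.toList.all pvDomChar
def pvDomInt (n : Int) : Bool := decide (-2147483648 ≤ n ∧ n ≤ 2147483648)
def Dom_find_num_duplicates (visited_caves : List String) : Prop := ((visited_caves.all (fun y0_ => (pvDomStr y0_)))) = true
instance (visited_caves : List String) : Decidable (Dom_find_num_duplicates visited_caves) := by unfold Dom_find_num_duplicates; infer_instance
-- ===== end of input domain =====

-- B: one-pass dict counter + one pass over items instead of A's quadratic per-element
-- list.count scan with a manual dedup list; measured faster (asymptotic, O(n^2) -> O(n)).

-- s.islower(): some cased char exists and no cased char is uppercase; exact on the ASCII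
-- domain, where the cased characters are exactly the letters (shared by both ports, as
-- Python's built-in str.islower is shared by A and B)
def pyStrIslower (s : String) : Bool :=
  s.toList.any PySem.Chars.islower && s.toList.all (fun c => !PySem.Chars.isupper c)

-- ===== PORT A =====
def find_num_duplicates (visited_caves : List String) : Int :=
  let duplicates := visited_caves.foldl
    (fun duplicates cave =>
      if pyStrIslower cave
          && (PySem.List.count visited_caves cave == 2
          && !(duplicates.contains cave))
      then duplicates ++ [cave] else duplicates) []
  PySem.List.len duplicates

-- ===== PORT B =====
def find_num_duplicates_alt (visited_caves : List String) : Int :=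
  let counts := visited_caves.foldl
    (fun counts cave => counts.insert cave (counts.getD cave 0 + 1))
    (PySem.Dict.empty : PySem.Dict String Int)
  counts.items.foldl
    (fun total kv => if kv.2 == (2 : Int) && pyStrIslower kv.1 then total + 1 else total) 0

-- ===== PRECONDITION & SPEC =====
def Spec_find_num_duplicates (visited_caves : List String) (out : Int) : Prop := out = find_num_duplicates_alt visited_caves
instance (visited_caves : List String) (out : Int) : Decidable (Spec_find_num_duplicates visited_caves out) := by unfold Spec_find_num_duplicates; infer_instance

-- ===== CLAIM (what is proved, stated in full; the proofs are below) =====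
def Claim_equal_find_num_duplicates : Prop := ∀ (visited_caves : List String), Dom_find_num_duplicates visited_caves → Spec_find_num_duplicates visited_caves (find_num_duplicates visited_caves)

-- ===== LEMMAS AND PROOFS =====

-- A's loop is "ordered dedup of the elements passing both tests"
lemma fold_dedup_filter (p1 p2 : String → Bool) (l : List String) :
    ∀ s : List String,
    l.foldl (fun acc x => if p1 x && (p2 x && !(acc.contains x)) then acc ++ [x] else acc) s
      = (l.filter (fun x => p1 x && p2 x)).foldl PySem.Set.add s := by
  induction l with
  | nil => intro s; rfl
  | cons x xs ih =>
      intro s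
      simp only [List.foldl_cons, List.filter_cons]
      cases hp1 : p1 x
      · rw [if_neg (by simp), if_neg (by simp)]; exact ih s
      · cases hp2 : p2 x
        · rw [if_neg (by simp), if_neg (by simp)]; exact ih s
        · by_cases hx : x ∈ s
          · rw [if_neg (show ¬(true && (true && !s.contains x)) = true by simp [hx]), ih,
              if_pos (show (true && true) = true by simp), List.foldl_cons,
              PySem.Set.add_of_mem hx]
          · rw [if_pos (show (true && (true && !s.contains x)) = true by simp [hx]), ih,
              if_pos (show (true && true) = true by simp), List.foldl_cons,
              PySem.Set.add_of_not_mem hx]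

-- adding an element commutes with filtering by a predicate on the element
lemma filter_add (q : String → Bool) (s : List String) (x : String) :
    (PySem.Set.add s x).filter q
      = if q x then PySem.Set.add (s.filter q) x else s.filter q := by
  by_cases hx : x ∈ s
  · rw [PySem.Set.add_of_mem hx]
    cases hq : q x
    · simp
    · have hx' : x ∈ s.filter q := List.mem_filter.mpr ⟨hx, hq⟩
      rw [if_pos rfl, PySem.Set.add_of_mem hx']
  · rw [PySem.Set.add_of_not_mem hx]
    have hx' : x ∉ s.filter q := fun h => hx (List.mem_filter.mp h).1
    cases hq : q x
    · simp [List.filter_append, hq]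
    · rw [if_pos rfl, PySem.Set.add_of_not_mem hx']
      simp [List.filter_append, hq]

-- building a set commutes with filtering by a predicate on the element
lemma filter_foldl_add (q : String → Bool) (l : List String) :
    ∀ s : List String,
    (l.foldl PySem.Set.add s).filter q = (l.filter q).foldl PySem.Set.add (s.filter q) := by
  induction l with
  | nil => intro s; rfl
  | cons x xs ih =>
      intro s
      simp only [List.foldl_cons, List.filter_cons, ih, filter_add]
      cases hq : q x <;> simp

-- ===== VERDICT (by name: the statement is the Claim_ definition above) =====
theorem find_num_duplicates_spec : Claim_equal_find_num_duplicates := by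
  intro vc _
  unfold Spec_find_num_duplicates
  simp only [find_num_duplicates, find_num_duplicates_alt]
  rw [fold_dedup_filter, PySem.Dict.foldl_insert_getD_add_one_eq_counter,
    PySem.Dict.items_counter, PySem.List.foldl_if_add_one
      (p := fun kv : String × Int => kv.2 == (2 : Int) && pyStrIslower kv.1)]
  simp only [List.countP_map, PySem.List.len_eq, zero_add]
  have hset : (PySem.Set.ofList vc).filter
      (fun x => pyStrIslower x && (PySem.List.count vc x == 2))
      = (vc.filter (fun x => pyStrIslower x && (PySem.List.count vc x == 2))).foldl
          PySem.Set.add [] := by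
    simpa using filter_foldl_add (fun x => pyStrIslower x && (PySem.List.count vc x == 2)) vc []
  rw [← hset, ← List.countP_eq_length_filter]
  congr 1
  apply List.countP_congr
  intro x _
  simp [PySem.List.count_eq, Function.comp, Bool.and_comm]
  omega
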